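-- pv_equiv track=rewrite | github.com/carolinux/advent_of_code | 2023/day15a.py | haash
-- ===== SOURCE A (Python) =====
-- def haash(seg):
--     res = 0
--     for ch in seg:
--         val = ord(ch)
--         res+=val
--         res*=17
--         res = res % 256
--
--     return res
-- ===== SOURCE B (Python) =====
-- def haash(seg):
--     total = 0
--     p = 17
--     for ch in reversed(seg):
--         total += ord(ch) * p
--         p = p * 17 % 256
--     return total % 256
-- ===== Notes on version B (the rewrite author's own statement) =====
-- stated objective: alternative
-- what changed: Replaces the rolling add-then-multiply accumulator with a Rabin-Karp style weighted power sum over the reversed string: each character contributes ord(ch) times a running power of 17 (kept reduced mod 256), and the total is reduced mod 256 once at the end.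
import Mathlib
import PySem

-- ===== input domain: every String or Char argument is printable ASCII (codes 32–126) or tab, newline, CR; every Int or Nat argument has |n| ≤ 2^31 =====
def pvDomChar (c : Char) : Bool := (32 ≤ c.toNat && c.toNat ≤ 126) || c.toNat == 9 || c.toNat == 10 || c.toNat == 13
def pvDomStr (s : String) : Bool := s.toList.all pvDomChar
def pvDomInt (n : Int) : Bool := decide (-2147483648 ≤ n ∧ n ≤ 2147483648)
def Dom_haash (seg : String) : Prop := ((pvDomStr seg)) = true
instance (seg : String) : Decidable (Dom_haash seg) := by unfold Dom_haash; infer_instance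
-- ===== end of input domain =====

-- B computes the hash as a Rabin-Karp weighted power sum over the reversed string (running power of 17
-- kept mod 256, total reduced mod 256 once at the end) instead of A's add-then-multiply rolling accumulator; objective: alternative.


-- ===== PORT A =====
-- res = 0; for ch in seg: res += ord(ch); res *= 17; res %= 256
def haashLoop : List Char → Int → Int
  | [], res => res
  | c :: cs, res => haashLoop cs (((res + (c.toNat : Int)) * 17) % 256)

def haash (seg : String) : Int := haashLoop seg.toList 0

-- ===== PORT B =====
-- total = 0; p = 17; for ch in reversed(seg): total += ord(ch)*p; p = p*17 % 256; return total % 256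
def haashAltLoop : List Char → Int × Int → Int × Int
  | [], st => st
  | c :: cs, (t, p) => haashAltLoop cs (t + (c.toNat : Int) * p, p * 17 % 256)

def haash_alt (seg : String) : Int := (haashAltLoop seg.toList.reverse (0, 17)).1 % 256

-- ===== PRECONDITION & SPEC =====
def Spec_haash (seg : String) (out : Int) : Prop := out = haash_alt seg
instance (seg : String) (out : Int) : Decidable (Spec_haash seg out) := by unfold Spec_haash; infer_instance

-- ===== CLAIM (what is proved, stated in full; the proofs are below) =====
def Claim_equal_haash : Prop := ∀ (seg : String), Dom_haash seg → Spec_haash seg (haash seg)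

-- ===== LEMMAS AND PROOFS =====

-- weighted sum with the head weighted 17^length: W (c::cs) = ord c * 17^(len) + W cs
def wsum : List Char → Int
  | [] => 0
  | c :: cs => (c.toNat : Int) * 17 ^ (cs.length + 1) + wsum cs

-- reversed-order Horner sum: wr (c::cs) = ord c + 17 * wr cs
def wr : List Char → Int
  | [] => 0
  | c :: cs => (c.toNat : Int) + 17 * wr cs

lemma haashLoop_eq (l : List Char) : ∀ r : Int,
    haashLoop l (r % 256) = (r * 17 ^ l.length + wsum l) % 256 := by
  induction l with
  | nil => intro r; simp [haashLoop, wsum]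
  | cons c cs ih =>
    intro r
    have h1 : ((r % 256 + (c.toNat : Int)) * 17) % 256 = ((r + (c.toNat : Int)) * 17) % 256 := by
      conv_lhs => rw [Int.mul_emod, Int.add_emod, Int.emod_emod_of_dvd _ (dvd_refl 256)]
      conv_rhs => rw [Int.mul_emod, Int.add_emod]
    have h2 := ih ((r + (c.toNat : Int)) * 17)
    simp only [haashLoop, h1, h2, wsum, List.length_cons]
    ring_nf

lemma haashAltLoop_eq (l : List Char) : ∀ t p : Int,
    (haashAltLoop l (t, p % 256)).1 % 256 = (t + wr l * p) % 256 := by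
  induction l with
  | nil => intro t p; simp [haashAltLoop, wr]
  | cons c cs ih =>
    intro t p
    have hp : p % 256 * 17 % 256 = (p * 17) % 256 := by
      conv_rhs => rw [Int.mul_emod]
      rw [Int.mul_emod, Int.emod_emod_of_dvd _ (dvd_refl 256)]
    simp only [haashAltLoop, hp, ih (t + (c.toNat : Int) * (p % 256)) (p * 17), wr]
    have key : t + (c.toNat : Int) * (p % 256) + wr cs * (p * 17)
        = (t + ((c.toNat : Int) + 17 * wr cs) * p) + 256 * (-((c.toNat : Int) * (p / 256))) := by
      rw [Int.emod_def]; ring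
    rw [key, Int.add_mul_emod_self_left]

lemma wr_append_singleton (xs : List Char) (c : Char) :
    wr (xs ++ [c]) = wr xs + 17 ^ xs.length * (c.toNat : Int) := by
  induction xs with
  | nil => simp [wr]
  | cons d ds ih => simp only [List.cons_append, wr, ih, List.length_cons]; ring

lemma wsum_eq_wr_reverse (l : List Char) : wsum l = 17 * wr l.reverse := by
  induction l with
  | nil => simp [wsum, wr]
  | cons c cs ih =>
    simp only [wsum, List.reverse_cons, wr_append_singleton, ih, List.length_reverse]
    ring

-- ===== VERDICT (by name: the statement is the Claim_ definition above) =====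
theorem haash_spec : Claim_equal_haash := by
  intro seg _
  unfold Spec_haash haash haash_alt
  have h0 : (0 : Int) = 0 % 256 := rfl
  have h17 : (17 : Int) = 17 % 256 := rfl
  rw [h0, haashLoop_eq, h17, haashAltLoop_eq, wsum_eq_wr_reverse]
  ring_nf
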